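-- pv_equiv track=rewrite | github.com/kiinji/FLARE-On-2018 | 6/chk.py | checksum_2fe
-- ===== SOURCE A (Python) =====
-- def checksum_2fe(encoded):
--     buff = [0xDC ,0x48 ,0x8F ,0x56 ,0xBC ,0x36 ,0xB0 ,0x64 ,0x40 ,0x27 ,0xE6 ,0x2C ,0xD2 ,0x3F ,0xC2 ,0x34 ,0x5D ,0x52 ,0xEE ,0xCD ,0xAA ,0xCA ,0x81 ,0x8D ,0x71 ,0x23 ,0x28 ,0xD7 ,0x96 ,0x4E ,0x7F ,0x6B ,0xA1 ,0x3E ,0xA3 ,0x12 ,0x91 ,0x26 ,0xE4 ,0x03 ,0x60 ,0x8C ,0x01 ,0x44 ,0x79 ,0xE3 ,0x84 ,0x35 ,0xB8 ,0x4A ,0xC1 ,0x55 ,0x1A ,0x9D ,0x11 ,0xE7 ,0x92 ,0xA4 ,0xD4 ,0x68 ,0x37 ,0x85 ,0x62 ,0x66 ,0xFC ,0xBF ,0xD8 ,0x98 ,0x9A ,0x8E ,0x32 ,0x20 ,0x16 ,0x38 ,0x57 ,0x0E ,0x18 ,0x5B ,0xF4 ,0x17 ,0x1E ,0xA0 ,0xDD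 ,0x53 ,0x5F ,0x06 ,0xF8 ,0xF6 ,0xE1 ,0x0C ,0x02 ,0x74 ,0xF3 ,0xC0 ,0xC3 ,0xF0 ,0x3C ,0x94 ,0x10 ,0xDB ,0x04 ,0xF9 ,0x08 ,0xD6 ,0x1F ,0xBE ,0xEF ,0x95 ,0xE5 ,0x50 ,0xB6 ,0xAB ,0x5A ,0x19 ,0xAD ,0x24 ,0x99 ,0x43 ,0xCB ,0xA5 ,0xEB ,0x39 ,0xCC ,0x67 ,0xB9 ,0xC5 ,0xC9 ,0xA6 ,0x6A ,0x90 ,0x7A ,0x0F ,0xD9 ,0x3B ,0x1C ,0xE8 ,0xA8 ,0x7E ,0xC4 ,0x72 ,0x8B ,0x63 ,0x1B ,0x59 ,0x07 ,0x49 ,0xAE ,0x05 ,0xA9 ,0xEC ,0x00 ,0xC6 ,0x31 ,0x14 ,0x69 ,0xBA ,0x82 ,0x1D ,0x65 ,0x46 ,0x70 ,0x29 ,0xAF ,0xC8 ,0xDE ,0xD0 ,0xFD ,0x77 ,0x73 ,0x2B ,0x6D ,0xDF ,0x6C ,0xFE ,0x30 ,0x2F ,0xF1 ,0x78 ,0x21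 ,0x7C ,0x4D ,0xCE ,0x13 ,0xB5 ,0x97 ,0x2A ,0x9E ,0xFF ,0xEA ,0xCF ,0x25 ,0xBD ,0xAC ,0x4C ,0x0D ,0x80 ,0xE9 ,0xB2 ,0x4B ,0xFA ,0x54 ,0x41 ,0x89 ,0x3A ,0x51 ,0xF7 ,0x00 ,0x8A ,0x2D ,0xDA ,0x33 ,0xF2 ,0x22 ,0x9B ,0xD5 ,0xA2 ,0x45 ,0x6E ,0x4F ,0xD3 ,0x76 ,0x3D ,0x86 ,0x2E ,0xBB ,0x7B ,0x0A ,0x42 ,0xB1 ,0x5E ,0xED ,0x9C ,0xE0 ,0x88 ,0x7D ,0x15 ,0x93 ,0xD1 ,0x83 ,0x6F ,0xFB ,0xB4 ,0x9F ,0x47 ,0x09 ,0xA7 ,0x87 ,0xF5 ,0x61 ,0xE2 ,0xC7 ,0xB3 ,0x75 ,0x0B ,0x58 ,0x5C, 0x14, 0x00, 0x00, 0x00]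
--
--     v11 = 0
--     v12 = 0
--     v13 = 0
--
--     decode_key = []
--     for i in range(0, 10):
--         v12 += 1
--         v12 = v12 % 256
--         v11 += buff[v12]
--         v11 = v11 % 256
--         buff[v12] ^= buff[v11]
--         buff[v11] ^= buff[v12]
--         buff[v12] ^= buff[v11]
--
--         v13 = buff[v12] + buff[v11]
--         v13 = v13 % 256
--         decode_key.append(buff[v13])
--
--     answer = []
--     for i in range(0, len(encoded)):
--         answer.append(encoded[i] ^ decode_key[i])
--
--     return answer
-- ===== SOURCE B (Python) =====
-- # The RC4-style setup loop never reads `encoded`, so the 10-byte keystream is a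
-- # constant; B embeds it and does a single XOR pass.
-- DECODE_KEY = [0xC3, 0x4A, 0xA4, 0x9A, 0x29, 0xD4, 0x2A, 0x04, 0x07, 0x1E]
--
-- def checksum_2fe(encoded):
--     return [encoded[i] ^ DECODE_KEY[i] for i in range(len(encoded))]
-- ===== Notes on version B (the rewrite author's own statement) =====
-- stated objective: simpler
-- what changed: The RC4-style key-setup loop never reads `encoded`, so its 10-byte keystream is a constant; B drops the whole mutable-buffer swap loop and just XORs the input against the precomputed 10-byte key literal in one comprehension.
import Mathlib
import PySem

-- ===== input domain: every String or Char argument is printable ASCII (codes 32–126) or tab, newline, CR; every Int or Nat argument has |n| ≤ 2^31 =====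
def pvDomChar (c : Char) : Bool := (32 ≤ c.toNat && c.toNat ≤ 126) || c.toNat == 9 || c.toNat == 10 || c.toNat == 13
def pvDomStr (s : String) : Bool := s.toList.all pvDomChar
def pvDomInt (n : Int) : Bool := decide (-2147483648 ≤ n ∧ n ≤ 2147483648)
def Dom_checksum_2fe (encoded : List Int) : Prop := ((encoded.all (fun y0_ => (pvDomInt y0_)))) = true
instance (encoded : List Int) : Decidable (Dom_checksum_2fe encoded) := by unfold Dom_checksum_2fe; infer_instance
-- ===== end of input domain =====

-- B replaces A's RC4-style key-setup loop (which never reads `encoded`) by its constant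
-- 10-byte result and does a single XOR pass; equivalence of the return values is proved.

-- ===== PORT A =====
-- A's initial buffer literal
def chkBuff0 : List Int := [220, 72, 143, 86, 188, 54, 176, 100, 64, 39, 230, 44, 210, 63, 194, 52, 93, 82, 238, 205, 170, 202, 129, 141, 113, 35, 40, 215, 150, 78, 127, 107, 161, 62, 163, 18, 145, 38, 228, 3, 96, 140, 1, 68, 121, 227, 132, 53, 184, 74, 193, 85, 26, 157, 17, 231, 146, 164, 212, 104, 55, 133, 98, 102, 252, 191, 216, 152, 154, 142, 50, 32, 22, 56, 87, 14, 24, 91, 244, 23, 30, 160, 221, 83, 95, 6, 248, 246, 225, 12, 2, 116, 243, 192, 195, 240, 60, 148, 16, 219, 4, 249, 8, 214, 31, 190, 239, 149, 229, 80, 182, 171, 90, 25, 173, 36, 153, 67, 203, 165, 235, 57, 204, 103, 185, 197, 201, 166, 106, 144, 122, 15, 217, 59, 28, 232, 168, 126, 196, 114, 139, 99, 27, 89, 7, 73, 174, 5, 169, 236, 0, 198, 49, 20, 105, 186, 130, 29, 101, 70, 112, 41, 175, 200, 222, 208, 253, 119, 115, 43, 109, 223, 108, 254, 48, 47, 241,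 120, 33, 124, 77, 206, 19, 181, 151, 42, 158, 255, 234, 207, 37, 189, 172, 76, 13, 128, 233, 178, 75, 250, 84, 65, 137, 58, 81, 247, 0, 138, 45, 218, 51, 242, 34, 155, 213, 162, 69, 110, 79, 211, 118, 61, 134, 46, 187, 123, 10, 66, 177, 94, 237, 156, 224, 136, 125, 21, 147, 209, 131, 111, 251, 180, 159, 71, 9, 167, 135, 245, 97, 226, 199, 179, 117, 11, 88, 92, 20, 0, 0, 0]

-- A's setup loop: state (buff, v11, v12, decode_key), 10 iterations; indices are always
-- in range (v11, v12 are reduced mod 256, buff has 260 elements), so pyGetD/pySetD are exact.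
def chkDecodeKey : List Int :=
  ((PySem.List.pyRange 0 10 1).foldl (fun (st : List Int × Int × Int × List Int) _ =>
    let buff := st.1
    let v12 := PySem.Int.mod (st.2.2.1 + 1) 256
    let v11 := PySem.Int.mod (st.2.1 + PySem.List.pyGetD buff v12 0) 256
    let buff := PySem.List.pySetD buff v12 (PySem.Int.bxor (PySem.List.pyGetD buff v12 0) (PySem.List.pyGetD buff v11 0))
    let buff := PySem.List.pySetD buff v11 (PySem.Int.bxor (PySem.List.pyGetD buff v11 0) (PySem.List.pyGetD buff v12 0))
    let buff := PySem.List.pySetD buff v12 (PySem.Int.bxor (PySem.List.pyGetD buff v12 0) (PySem.List.pyGetD buff v11 0))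
    let v13 := PySem.Int.mod (PySem.List.pyGetD buff v12 0 + PySem.List.pyGetD buff v11 0) 256
    (buff, v11, v12, st.2.2.2 ++ [PySem.List.pyGetD buff v13 0]))
    (chkBuff0, 0, 0, [])).2.2.2

-- A's answer loop; decode_key[i] is exact under Pre_ (Python raises IndexError for i ≥ 10)
def checksum_2fe (encoded : List Int) : List Int :=
  (PySem.List.pyRange 0 encoded.length 1).foldl
    (fun ans i => ans ++ [PySem.Int.bxor (PySem.List.pyGetD encoded i 0) (PySem.List.pyGetD chkDecodeKey i 0)]) []

-- ===== PORT B =====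
def altDecodeKey : List Int := [0xC3, 0x4A, 0xA4, 0x9A, 0x29, 0xD4, 0x2A, 0x04, 0x07, 0x1E]

def checksum_2fe_alt (encoded : List Int) : List Int :=
  (PySem.List.pyRange 0 encoded.length 1).map
    (fun i => PySem.Int.bxor (PySem.List.pyGetD encoded i 0) (PySem.List.pyGetD altDecodeKey i 0))

-- ===== PRECONDITION & SPEC =====
-- Pre_ excludes inputs with more than 10 elements, on which Python A (and B) raise IndexError
-- (decode_key has only 10 entries).
def Pre_checksum_2fe (encoded : List Int) : Prop := encoded.length ≤ 10
instance (encoded : List Int) : Decidable (Pre_checksum_2fe encoded) := by unfold Pre_checksum_2fe; infer_instance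
def pvWitness_checksum_2fe : List Int := [1, -2, 300]

def Spec_checksum_2fe (encoded : List Int) (out : List Int) : Prop := out = checksum_2fe_alt encoded
instance (encoded : List Int) (out : List Int) : Decidable (Spec_checksum_2fe encoded out) := by unfold Spec_checksum_2fe; infer_instance

-- ===== CLAIM (what is proved, stated in full; the proofs are below) =====
def Claim_equal_checksum_2fe : Prop := ∀ (encoded : List Int), Dom_checksum_2fe encoded → Pre_checksum_2fe encoded → Spec_checksum_2fe encoded (checksum_2fe encoded)

-- ===== LEMMAS AND PROOFS =====
set_option maxRecDepth 100000 in
theorem chkDecodeKey_eq : chkDecodeKey = altDecodeKey := by decide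

theorem foldl_append_map (f : Int → Int) (l : List Int) (acc : List Int) :
    l.foldl (fun ans i => ans ++ [f i]) acc = acc ++ l.map f := by
  induction l generalizing acc with
  | nil => simp
  | cons x xs ih => simp [List.foldl, ih]

-- ===== VERDICT (by name: the statement is the Claim_ definition above) =====
theorem checksum_2fe_spec : Claim_equal_checksum_2fe := by
  intro encoded _ _
  unfold Spec_checksum_2fe checksum_2fe checksum_2fe_alt
  rw [chkDecodeKey_eq, foldl_append_map]
  simp
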